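-- pv_equiv track=rewrite | github.com/jongmung/Coding_Study | 8week.py | solution
-- ===== SOURCE A (Python) =====
-- from collections import Counter
-- from collections import Counter
--
-- def solution(k, tangerine):
--     answer = 0
--     counter=Counter(tangerine)
--     # {3: 2, 2: 2, 5: 2, 1: 1, 4: 1}
--     sort_=sorted(counter.items(),key=lambda x:x[1],reverse=True)
--     #정렬된 딕셔너리로 귤 개수 맞추기
--     cnt=0
--     for i in sort_:
--         k-=i[1]
--         answer+=1
--         if k<=0:
--             break
--     return answer
-- ===== SOURCE B (Python) =====
-- from collections import Counter
--
-- def solution(k, tangerine):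
--     freq = Counter(Counter(tangerine).values())
--     answer = 0
--     for f in range(max(freq, default=0), 0, -1):
--         for _ in range(freq.get(f, 0)):
--             k -= f
--             answer += 1
--             if k <= 0:
--                 return answer
--     return answer
-- ===== Notes on version B (the rewrite author's own statement) =====
-- stated objective: alternative
-- what changed: Replaces A's comparison sort of (size, count) pairs by a Counter-of-counts histogram walked from the maximum frequency down to 1, visiting types in the same high-to-low frequency order without sorting.
import Mathlib
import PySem

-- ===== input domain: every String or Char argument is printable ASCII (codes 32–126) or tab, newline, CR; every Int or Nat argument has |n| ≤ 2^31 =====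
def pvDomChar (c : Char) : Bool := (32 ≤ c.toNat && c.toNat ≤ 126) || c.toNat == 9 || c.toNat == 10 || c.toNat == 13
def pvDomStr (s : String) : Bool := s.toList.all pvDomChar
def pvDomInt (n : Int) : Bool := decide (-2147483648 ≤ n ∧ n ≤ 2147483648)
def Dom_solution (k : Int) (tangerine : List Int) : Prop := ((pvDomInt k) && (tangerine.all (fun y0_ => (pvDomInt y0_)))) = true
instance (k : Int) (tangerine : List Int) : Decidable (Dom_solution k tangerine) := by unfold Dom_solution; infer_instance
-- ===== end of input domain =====

-- B replaces A's sort of (size, count) pairs by a count-of-counts histogram walked from the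
-- highest frequency down (idiomatic bucketed traversal); return values proved equal everywhere.

-- ===== PORT A =====
-- the 'for i in sort_: k -= i[1]; answer += 1; if k <= 0: break' loop of A
def solutionLoop (sort_ : List (Int × Int)) (k answer : Int) : Int :=
  match sort_ with
  | [] => answer
  | i :: rest =>
    let k := k - i.2
    let answer := answer + 1
    if k ≤ 0 then answer else solutionLoop rest k answer

def solution (k : Int) (tangerine : List Int) : Int :=
  let counter := PySem.Dict.counter tangerine
  let sort_ := PySem.List.sorted counter.items (fun x => x.2) true
  solutionLoop sort_ k 0

-- ===== PORT B =====
-- inner 'for _ in range(freq.get(f, 0))' loop of B; third component = early 'return' taken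
def altInner (f : Int) (reps : Nat) (k answer : Int) : Int × Int × Bool :=
  match reps with
  | 0 => (k, answer, false)
  | n + 1 =>
    let k := k - f
    let answer := answer + 1
    if k ≤ 0 then (k, answer, true) else altInner f n k answer

-- outer 'for f in range(max(freq, default=0), 0, -1)' loop of B
def altOuter (freq : PySem.Dict Int Int) (fs : List Int) (k answer : Int) : Int :=
  match fs with
  | [] => answer
  | f :: rest =>
    let r := altInner f (freq.getD f 0).toNat k answer
    if r.2.2 then r.2.1 else altOuter freq rest r.1 r.2.1

def solution_alt (k : Int) (tangerine : List Int) : Int :=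
  let freq := PySem.Dict.counter (PySem.Dict.counter tangerine).values
  altOuter freq (PySem.List.pyRange (PySem.List.maxD freq.keys (fun x => x) 0) 0 (-1)) k 0

-- ===== PRECONDITION & SPEC =====
def Spec_solution (k : Int) (tangerine : List Int) (out : Int) : Prop := out = solution_alt k tangerine
instance (k : Int) (tangerine : List Int) (out : Int) : Decidable (Spec_solution k tangerine out) := by unfold Spec_solution; infer_instance

-- ===== CLAIM (what is proved, stated in full; the proofs are below) =====
def Claim_equal_solution : Prop := ∀ (k : Int) (tangerine : List Int), Dom_solution k tangerine → Spec_solution k tangerine (solution k tangerine)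

-- ===== LEMMAS AND PROOFS =====

-- the common core: walk a list of counts, subtracting each and counting, stop when k ≤ 0
def go (cs : List Int) (k answer : Int) : Int :=
  match cs with
  | [] => answer
  | c :: rest => if k - c ≤ 0 then answer + 1 else go rest (k - c) (answer + 1)

theorem solutionLoop_eq_go (l : List (Int × Int)) (k a : Int) :
    solutionLoop l k a = go (l.map (·.2)) k a := by
  induction l generalizing k a with
  | nil => rfl
  | cons i rest ih =>
    simp only [solutionLoop, go, List.map_cons]
    split_ifs <;> simp [ih]

theorem altInner_go (n : Nat) (f : Int) (rest : List Int) (k a : Int) :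
    (if (altInner f n k a).2.2 then (altInner f n k a).2.1
     else go rest (altInner f n k a).1 (altInner f n k a).2.1)
      = go (List.replicate n f ++ rest) k a := by
  induction n generalizing k a with
  | zero => simp [altInner]
  | succ n ih =>
    simp only [altInner, List.replicate_succ, List.cons_append, go]
    by_cases h : k - f ≤ 0
    · simp [h]
    · simp only [if_neg h]
      exact ih (k - f) (a + 1)

theorem altOuter_eq_go (freq : PySem.Dict Int Int) (fs : List Int) (k a : Int) :
    altOuter freq fs k a = go (fs.flatMap (fun f => List.replicate (freq.getD f 0).toNat f)) k a := by
  induction fs generalizing k a with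
  | nil => rfl
  | cons f rest ih =>
    simp only [altOuter, List.flatMap_cons]
    rw [← altInner_go ((freq.getD f 0).toNat) f]
    split_ifs with h <;> simp [ih]

theorem count_flatMap_replicate (fs : List Int) (c : Int → Nat) (v : Int) (hnd : fs.Nodup) :
    (fs.flatMap (fun f => List.replicate (c f) f)).count v = if v ∈ fs then c v else 0 := by
  induction fs with
  | nil => simp
  | cons f rest ih =>
    rcases List.nodup_cons.mp hnd with ⟨hf, hrest⟩
    simp only [List.flatMap_cons, List.count_append, ih hrest, List.count_replicate, List.mem_cons]
    by_cases hv : v = f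
    · subst hv; simp [hf]
    · simp [hv, Ne.symm hv]

theorem pairwise_flatMap_replicate (fs : List Int) (c : Int → Nat)
    (h : fs.Pairwise (fun a b => b < a)) :
    (fs.flatMap (fun f => List.replicate (c f) f)).Pairwise (fun a b => b ≤ a) := by
  induction fs with
  | nil => simp
  | cons f rest ih =>
    rcases List.pairwise_cons.mp h with ⟨hf, hrest⟩
    simp only [List.flatMap_cons]
    rw [List.pairwise_append]
    refine ⟨List.pairwise_replicate.mpr (Or.inr (le_refl f)), ih hrest, ?_⟩
    intro x hx y hy
    rcases List.mem_flatMap.mp hy with ⟨g, hg, hyg⟩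
    rw [List.eq_of_mem_replicate hx, List.eq_of_mem_replicate hyg]
    exact le_of_lt (hf g hg)
theorem counts_eq (tangerine : List Int) :
    (PySem.List.sorted (PySem.Dict.counter tangerine).items (fun x => x.2) true).map (·.2)
      = (PySem.List.pyRange
            (PySem.List.maxD (PySem.Dict.counter (PySem.Dict.counter tangerine).values).keys (fun x => x) 0) 0 (-1)).flatMap
          (fun f => List.replicate ((PySem.Dict.counter (PySem.Dict.counter tangerine).values).getD f 0).toNat f) := by
  set vals := (PySem.Dict.counter tangerine).values with hvals_def
  set M := PySem.List.maxD (PySem.Dict.counter vals).keys (fun x => x) 0 with hM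
  have hfun : (fun f => List.replicate ((PySem.Dict.counter vals).getD f 0).toNat f)
      = (fun f => List.replicate (vals.count f) f) := by
    funext f
    rw [PySem.Dict.getD_counter, Int.toNat_natCast]
  rw [hfun]
  -- facts about vals
  have hpos : ∀ v ∈ vals, 0 < v := by
    intro v hv
    have : vals = (PySem.Set.ofList tangerine).map (fun k => ((tangerine.count k : Nat) : Int)) := by
      show (PySem.Dict.counter tangerine).items.map (·.2) = _
      rw [PySem.Dict.items_counter]; simp [List.map_map, Function.comp]
    rw [this] at hv
    rcases List.mem_map.mp hv with ⟨kk, hkk, rfl⟩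
    have : kk ∈ tangerine := (PySem.Set.mem_ofList _ _).mp hkk
    exact_mod_cast List.count_pos_iff.mpr this
  have hle : ∀ v ∈ vals, v ≤ M := by
    intro v hv
    rw [hM, PySem.Dict.keys_counter]
    exact PySem.List.le_maxD_id _ 0 v ((PySem.Set.mem_ofList _ _).mpr hv)
  -- pyRange facts
  have hnd : (PySem.List.pyRange M 0 (-1)).Nodup := by
    rw [PySem.List.pyRange_neg_one_eq_reverse, List.nodup_reverse]
    exact PySem.List.nodup_pyRange_one _ _
  have hgt : (PySem.List.pyRange M 0 (-1)).Pairwise (fun a b => b < a) := by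
    rw [PySem.List.pyRange_neg_one_eq_reverse, List.pairwise_reverse]
    exact PySem.List.pairwise_lt_pyRange_one _ _
  -- permutations with vals
  have hpermL : ((PySem.List.sorted (PySem.Dict.counter tangerine).items (fun x => x.2) true).map (·.2)).Perm vals := by
    exact (PySem.List.sorted_perm _ _ _).map _
  have hpermR : ((PySem.List.pyRange M 0 (-1)).flatMap (fun f => List.replicate (vals.count f) f)).Perm vals := by
    rw [List.perm_iff_count]
    intro v
    rw [count_flatMap_replicate _ _ _ hnd]
    by_cases hv : v ∈ PySem.List.pyRange M 0 (-1)
    · simp [hv]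
    · have hmem := PySem.List.mem_pyRange_neg_one.not.mp hv
      have : v ∉ vals := fun h => hmem ⟨hpos v h, hle v h⟩
      simp [hv, List.count_eq_zero_of_not_mem this]
  -- both non-increasing
  have hsortL : ((PySem.List.sorted (PySem.Dict.counter tangerine).items (fun x => x.2) true).map (·.2)).Pairwise
      (fun a b : Int => b ≤ a) := by
    rw [List.pairwise_map]
    exact PySem.List.sorted_pairwise_rev _ _
  have hsortR := pairwise_flatMap_replicate (PySem.List.pyRange M 0 (-1)) (fun f => vals.count f) hgt
  exact List.Perm.eq_of_pairwise (fun a b _ _ h1 h2 => le_antisymm h2 h1) hsortL hsortR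
    (hpermL.trans hpermR.symm)
theorem solution_spec : Claim_equal_solution := by
  intro k tangerine _
  unfold Spec_solution solution solution_alt
  rw [solutionLoop_eq_go, altOuter_eq_go, counts_eq]
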